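-- pv_equiv track=rewrite | github.com/guowei-xie/roombot | src/helper.py | room_id_to_room_name
-- ===== SOURCE A (Python) =====
-- def room_id_to_room_name(room_id_list, room_config_table):
--     """
--     将room_id列表转为room_name列表，输出顺序与输入的room_id_list一致
--     room_id_list: 会议室ID列表
--     room_config_table: 会议室配置表
--     返回:
--         list: 会议室名称列表
--     """
--     if not room_config_table or not room_id_list:
--         return []
--
--     # 先构造一个room_id到room_name的映射
--     id_to_name = {}
--     for record in room_config_table:
--         fields = record.get("fields", {})
--         room_id = fields.get("room_id")
--         room_name = fields.get("room_name")
--         if room_id is not None and room_name is not None: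
--             id_to_name[room_id] = room_name
--
--     # 按照room_id_list顺序输出
--     room_name_list = []
--     for room_id in room_id_list:
--         if room_id in id_to_name:
--             room_name_list.append(id_to_name[room_id])
--     return room_name_list
-- ===== SOURCE B (Python) =====
-- def room_id_to_room_name(room_id_list, room_config_table):
--     if not room_config_table or not room_id_list:
--         return []
--     room_name_list = []
--     for rid in room_id_list:
--         found = None
--         for record in room_config_table:
--             fields = record.get("fields", {})
--             if fields.get("room_id") == rid and fields.get("room_name") is not None:
--                 found = fields.get("room_name")
--         if found is not None:
--             room_name_list.append(found)
--     return room_name_list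
-- ===== Notes on version B (the rewrite author's own statement) =====
-- stated objective: alternative
-- what changed: Replaces the precomputed id->name dict with a direct per-id scan of the config table that keeps the last matching record's room_name (mirroring dict overwrite), appending only when a match exists.
import Mathlib
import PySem

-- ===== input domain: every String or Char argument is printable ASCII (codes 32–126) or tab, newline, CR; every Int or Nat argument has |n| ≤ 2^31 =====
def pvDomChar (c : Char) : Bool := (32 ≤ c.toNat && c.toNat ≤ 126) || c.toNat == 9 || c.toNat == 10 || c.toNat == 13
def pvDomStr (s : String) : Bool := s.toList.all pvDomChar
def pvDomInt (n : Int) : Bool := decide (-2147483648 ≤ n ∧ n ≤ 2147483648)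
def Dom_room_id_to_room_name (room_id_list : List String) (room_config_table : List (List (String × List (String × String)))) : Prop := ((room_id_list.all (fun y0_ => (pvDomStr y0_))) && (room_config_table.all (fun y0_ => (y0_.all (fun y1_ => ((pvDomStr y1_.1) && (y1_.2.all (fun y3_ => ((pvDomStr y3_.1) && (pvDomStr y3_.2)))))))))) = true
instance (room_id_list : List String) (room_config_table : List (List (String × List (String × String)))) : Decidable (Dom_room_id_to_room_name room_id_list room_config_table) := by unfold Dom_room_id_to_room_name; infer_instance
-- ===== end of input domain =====

-- B replaces A's precomputed id->name dict with a direct last-match scan of the config table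
-- per requested id (alternative decomposition, same return value; not faster).

-- ===== PORT A =====
-- A: build an id->name dict from the table (last write wins), then look each id up in input order.
def room_id_to_room_name (room_id_list : List String) (room_config_table : List (List (String × List (String × String)))) : List String :=
  if room_config_table = [] ∨ room_id_list = [] then []
  else
    let id_to_name : PySem.Dict String String :=
      room_config_table.foldl (fun d record =>
        let fields := PySem.Dict.getD (PySem.Dict.mk record) "fields" []
        match (PySem.Dict.mk fields).get? "room_id", (PySem.Dict.mk fields).get? "room_name" with
        | some i, some n => d.insert i n
        | _, _ => d) PySem.Dict.empty
    room_id_list.foldl (fun acc rid =>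
      match id_to_name.get? rid with
      | some n => acc ++ [n]
      | none => acc) []

-- ===== PORT B =====
-- B: no dict; for each id scan the whole table keeping the LAST matching record's room_name.
def pvLastMatch (room_config_table : List (List (String × List (String × String)))) (rid : String) : Option String :=
  room_config_table.foldl (fun found record =>
    let fields := PySem.Dict.getD (PySem.Dict.mk record) "fields" []
    if (PySem.Dict.mk fields).get? "room_id" = some rid ∧ ((PySem.Dict.mk fields).get? "room_name").isSome then
      (PySem.Dict.mk fields).get? "room_name"
    else found) none

def room_id_to_room_name_alt (room_id_list : List String) (room_config_table : List (List (String × List (String × String)))) : List String :=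
  if room_config_table = [] ∨ room_id_list = [] then []
  else
    room_id_list.foldl (fun acc rid =>
      let found := pvLastMatch room_config_table rid
      if found.isSome then acc ++ [found.getD ""] else acc) []

-- ===== PRECONDITION & SPEC =====
-- Pre_ excludes association lists that duplicate the "fields", "room_id" or "room_name" key:
-- a Python dict argument cannot carry duplicate keys, so no Python call of A ever sees such
-- an input and the first-match lookup convention is only determined up to this exclusion.
def Pre_room_id_to_room_name (room_id_list : List String) (room_config_table : List (List (String × List (String × String)))) : Prop :=
  ∀ record ∈ room_config_table, (record.map Prod.fst).count "fields" ≤ 1 ∧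
    ∀ fields ∈ record.map Prod.snd,
      (fields.map Prod.fst).count "room_id" ≤ 1 ∧ (fields.map Prod.fst).count "room_name" ≤ 1
instance (room_id_list : List String) (room_config_table : List (List (String × List (String × String)))) : Decidable (Pre_room_id_to_room_name room_id_list room_config_table) := by unfold Pre_room_id_to_room_name; infer_instance
def pvWitness_room_id_to_room_name : List String × (List (List (String × List (String × String)))) :=
  (["R1", "R2"], [[("fields", [("room_id", "R1"), ("room_name", "Room One")])],
                  [("fields", [("room_id", "R3"), ("room_name", "Room Three")])]])

def Spec_room_id_to_room_name (room_id_list : List String) (room_config_table : List (List (String × List (String × String)))) (out : List String) : Prop := out = room_id_to_room_name_alt room_id_list room_config_table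
instance (room_id_list : List String) (room_config_table : List (List (String × List (String × String)))) (out : List String) : Decidable (Spec_room_id_to_room_name room_id_list room_config_table out) := by unfold Spec_room_id_to_room_name; infer_instance

-- ===== CLAIM (what is proved, stated in full; the proofs are below) =====
def Claim_equal_room_id_to_room_name : Prop := ∀ (room_id_list : List String) (room_config_table : List (List (String × List (String × String)))), Dom_room_id_to_room_name room_id_list room_config_table → Pre_room_id_to_room_name room_id_list room_config_table → Spec_room_id_to_room_name room_id_list room_config_table (room_id_to_room_name room_id_list room_config_table)

-- ===== LEMMAS AND PROOFS =====

-- The lookup in A's foldl-built dict equals B's last-match scan, for any starting dict.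
lemma pvLastMatch_eq_get (room_config_table : List (List (String × List (String × String)))) (rid : String) (d : PySem.Dict String String) :
    (room_config_table.foldl (fun d record =>
        let fields := PySem.Dict.getD (PySem.Dict.mk record) "fields" []
        match (PySem.Dict.mk fields).get? "room_id", (PySem.Dict.mk fields).get? "room_name" with
        | some i, some n => d.insert i n
        | _, _ => d) d).get? rid
    = room_config_table.foldl (fun found record =>
        let fields := PySem.Dict.getD (PySem.Dict.mk record) "fields" []
        if (PySem.Dict.mk fields).get? "room_id" = some rid ∧ ((PySem.Dict.mk fields).get? "room_name").isSome then
          (PySem.Dict.mk fields).get? "room_name"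
        else found) (d.get? rid) := by
  induction room_config_table generalizing d with
  | nil => rfl
  | cons record rest ih =>
    simp only [List.foldl_cons]
    rcases h1 : (PySem.Dict.mk (PySem.Dict.getD (PySem.Dict.mk record) "fields" [])).get? "room_id" with _ | i <;>
    rcases h2 : (PySem.Dict.mk (PySem.Dict.getD (PySem.Dict.mk record) "fields" [])).get? "room_name" with _ | n <;>
      simp only [Option.isSome_some, Option.isSome_none, and_true, and_false,
        Bool.false_eq_true, reduceCtorEq, if_neg, not_false_iff] <;> rw [ih]
    · rw [PySem.Dict.get?_insert]
      rcases eq_or_ne rid i with h | h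
      · subst h; simp
      · rw [if_neg h, if_neg (by simpa [eq_comm] using h)]

theorem room_id_to_room_name_spec : Claim_equal_room_id_to_room_name := by
  intro ids table _ _
  unfold Spec_room_id_to_room_name room_id_to_room_name room_id_to_room_name_alt
  by_cases h : table = [] ∨ ids = []
  · simp [h]
  · simp only [h, if_false]
    have hfun : ∀ rid, pvLastMatch table rid =
        (table.foldl (fun d record =>
          let fields := PySem.Dict.getD (PySem.Dict.mk record) "fields" []
          match (PySem.Dict.mk fields).get? "room_id", (PySem.Dict.mk fields).get? "room_name" with
          | some i, some n => d.insert i n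
          | _, _ => d) PySem.Dict.empty).get? rid := by
      intro rid
      unfold pvLastMatch
      conv_lhs => rw [show (none : Option String) = (PySem.Dict.empty : PySem.Dict String String).get? rid from rfl]
      rw [← pvLastMatch_eq_get]
    have : (fun (acc : List String) rid =>
        let found := pvLastMatch table rid
        if found.isSome then acc ++ [found.getD ""] else acc)
        = (fun (acc : List String) rid =>
        match (table.foldl (fun d record =>
          let fields := PySem.Dict.getD (PySem.Dict.mk record) "fields" []
          match (PySem.Dict.mk fields).get? "room_id", (PySem.Dict.mk fields).get? "room_name" with
          | some i, some n => d.insert i n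
          | _, _ => d) PySem.Dict.empty).get? rid with
        | some n => acc ++ [n]
        | none => acc) := by
      funext acc rid
      rw [show pvLastMatch table rid = _ from hfun rid]
      rcases h : (table.foldl (fun d record =>
          let fields := PySem.Dict.getD (PySem.Dict.mk record) "fields" []
          match (PySem.Dict.mk fields).get? "room_id", (PySem.Dict.mk fields).get? "room_name" with
          | some i, some n => d.insert i n
          | _, _ => d) PySem.Dict.empty).get? rid with _ | n <;> simp [h]
    rw [this]
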